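-- pv_equiv track=rewrite | github.com/MrBrantCode/unitest_baseline | mut_generate/mist_train_taco/taco_10277/solution.py | max_bitwise_or
-- ===== SOURCE A (Python) =====
-- def max_bitwise_or(L: int, R: int) -> int:
--     """
--     Calculate the maximum possible value of the bitwise OR of two integers chosen from the interval [L, R].
--
--     Parameters:
--     L (int): The lower bound of the interval.
--     R (int): The upper bound of the interval.
--
--     Returns:
--     int: The maximum bitwise OR value.
--     """
--     b1, b2 = bin(L)[2:], bin(R)[2:]
--
--     if len(b1) != len(b2):
--         max_len = max(len(b1), len(b2))
--         return int('1' * max_len, 2)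
--     else:
--         c = 0
--         while c < len(b1) and b1[c] == b2[c]:
--             c += 1
--         ans = b1[:c] + '1' * (len(b1) - c)
--         return int(ans, 2)
-- ===== SOURCE B (Python) =====
-- def max_bitwise_or(L: int, R: int) -> int:
--     w1, w2 = len(bin(L)) - 2, len(bin(R)) - 2
--     if w1 != w2:
--         return (1 << max(w1, w2)) - 1
--     if L == R:
--         return L
--     p = (L ^ R).bit_length()
--     return R | ((1 << p) - 1)
-- ===== Notes on version B (the rewrite author's own statement) =====
-- stated objective: idiomatic
-- what changed: Replaced A's binary-string construction, '1'*n string building, int(s,2) parsing and character-by-character common-prefix while-loop by closed-form bit arithmetic: unequal bin widths give all ones of the larger width, equal widths give R | ((1 << p) - 1) with p = (L ^ R).bit_length().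
-- outside the precondition, e.g. on max_bitwise_or(-1, 3): A returns 3, B returns 7; on max_bitwise_or(-2, -3): A raises ValueError, B returns -1
import Mathlib
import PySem

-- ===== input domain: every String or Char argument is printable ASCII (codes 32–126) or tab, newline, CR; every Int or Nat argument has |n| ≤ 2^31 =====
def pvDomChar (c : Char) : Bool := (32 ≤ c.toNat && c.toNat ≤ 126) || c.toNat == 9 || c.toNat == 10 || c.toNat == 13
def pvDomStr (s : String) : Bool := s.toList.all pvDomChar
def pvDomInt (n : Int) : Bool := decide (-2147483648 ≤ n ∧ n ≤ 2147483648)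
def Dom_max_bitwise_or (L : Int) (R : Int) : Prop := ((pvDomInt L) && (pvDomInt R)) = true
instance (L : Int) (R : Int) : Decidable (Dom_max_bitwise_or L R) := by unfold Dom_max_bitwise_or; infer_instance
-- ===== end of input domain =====

-- B replaces A's binary-string construction and common-prefix scan by closed-form bit arithmetic
-- (idiomatic); A = B on every input admitted by Pre_ below.

-- ===== PORT A =====
-- binary digits of n, most significant first (empty for 0): the digit core of Python's bin()
def pvNatBinGo (n : Nat) : List Char :=
  if _h : n = 0 then []
  else pvNatBinGo (n / 2) ++ [if n % 2 = 1 then '1' else '0']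
decreasing_by exact Nat.div_lt_self (Nat.pos_of_ne_zero _h) one_lt_two

-- bin(n)[2:] for n ≥ 0 (bin(0) = "0b0")
def pvBinNat (n : Nat) : List Char := if n = 0 then ['0'] else pvNatBinGo n

-- bin(x)[2:]; for x < 0 Python's bin gives "-0b…", so the slice keeps a 'b' before the digits
def pvBinSlice2 (x : Int) : List Char :=
  if x < 0 then 'b' :: pvBinNat x.natAbs else pvBinNat x.toNat

-- int(s, 2): exact on nonempty strings of '0'/'1' digits; on any other string (reachable only for
-- negative arguments, which carry the leftover 'b') Python raises ValueError — excluded by Pre_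
def pvParseBin (s : List Char) : Int :=
  s.foldl (fun a c => 2 * a + (if c = '1' then 1 else 0)) 0

-- the while loop: c advances while the characters agree (A runs it only on equal-length strings)
def pvPrefLen : List Char → List Char → Nat
  | x :: xs, y :: ys => if x = y then pvPrefLen xs ys + 1 else 0
  | _, _ => 0

def max_bitwise_or (L : Int) (R : Int) : Int :=
  let b1 := pvBinSlice2 L
  let b2 := pvBinSlice2 R
  if b1.length ≠ b2.length then
    let maxLen := max b1.length b2.length
    pvParseBin (List.replicate maxLen '1')
  else
    let c := pvPrefLen b1 b2
    let ans := b1.take c ++ List.replicate (b1.length - c) '1'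
    pvParseBin ans

-- ===== PORT B =====
-- int.bit_length() of |x| : number of binary digits of abs(x), ported by hand
-- (structural recursion on a fuel argument, so that the kernel can evaluate it; fuel n suffices
-- because the argument at least halves at every step)
def pvBitLenAux : Nat → Nat → Nat
  | _, 0 => 0
  | 0, _ + 1 => 0
  | fuel + 1, n + 1 => pvBitLenAux fuel ((n + 1) / 2) + 1

def pvBitLen (n : Nat) : Nat := pvBitLenAux n n

-- len(bin(x)) computed arithmetically: optional '-', then "0b", then max 1 (bit length of |x|) digits
def pvPyBinLen (x : Int) : Nat :=
  (if x < 0 then 1 else 0) + 2 + max 1 (pvBitLen x.natAbs)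

def max_bitwise_or_alt (L : Int) (R : Int) : Int :=
  let w1 := pvPyBinLen L - 2                    -- w1 = len(bin(L)) - 2
  let w2 := pvPyBinLen R - 2                    -- w2 = len(bin(R)) - 2
  if w1 ≠ w2 then (1 <<< max w1 w2) - 1         -- (1 << max(w1, w2)) - 1
  else if L = R then L
  else
    let p := pvBitLen (Int.xor L R).natAbs      -- p = (L ^ R).bit_length()
    Int.lor R ((1 <<< p) - 1)                   -- R | ((1 << p) - 1)

-- ===== PRECONDITION & SPEC =====
-- pvDigits n d says: d is the number of binary digits of n as Python's bin prints them
-- (1 for n ≤ 1, otherwise the unique d with 2^(d-1) ≤ n < 2^d)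
def pvDigits (n : Nat) (d : Nat) : Prop := 1 ≤ d ∧ n < 2 ^ d ∧ (d = 1 ∨ 2 ^ (d - 1) ≤ n)

-- the two arguments have bin-strings of equal width, a negative one carrying one extra
-- character (the 'b' kept by the slice bin(x)[2:]); digit counts are < 34 on the ±2^31 domain
def pvSameWidth (L : Int) (R : Int) : Prop :=
  ∃ d1 < 34, ∃ d2 < 34, pvDigits L.natAbs d1 ∧ pvDigits R.natAbs d2 ∧
    (if L < 0 then d1 + 1 else d1) = (if R < 0 then d2 + 1 else d2)

-- Pre_ excludes the inputs where a negative argument (outside the problem's natural domain,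
-- [L, R] being an interval of non-negative integers) meets an equal bin-string width: there A
-- either raises ValueError (both arguments negative) or, for mixed signs, returns an all-ones
-- value whose width accidentally counts the 'b' left over from slicing "-0b" — a corner no one
-- would specify, on which B returns the value of its own formula.
def Pre_max_bitwise_or (L : Int) (R : Int) : Prop :=
  ¬((L < 0 ∨ R < 0) ∧ pvSameWidth L R)
instance (L : Int) (R : Int) : Decidable (Pre_max_bitwise_or L R) := by
  unfold Pre_max_bitwise_or pvSameWidth pvDigits; infer_instance

def pvWitness_max_bitwise_or : Int × Int := (5, 12)

def Spec_max_bitwise_or (L : Int) (R : Int) (out : Int) : Prop := out = max_bitwise_or_alt L R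
instance (L : Int) (R : Int) (out : Int) : Decidable (Spec_max_bitwise_or L R out) := by
  unfold Spec_max_bitwise_or; infer_instance

-- ===== CLAIM (what is proved, stated in full; the proofs are below) =====
def Claim_equal_max_bitwise_or : Prop := ∀ (L : Int) (R : Int), Dom_max_bitwise_or L R → Pre_max_bitwise_or L R → Spec_max_bitwise_or L R (max_bitwise_or L R)

-- ===== LEMMAS AND PROOFS =====

def pvBit (c : Char) : Nat := if c = '1' then 1 else 0

def parseN (s : List Char) : Nat := s.foldl (fun a c => 2 * a + pvBit c) 0

def pvValid (s : List Char) : Prop := ∀ c ∈ s, c = '0' ∨ c = '1'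

-- the Nat-level value A computes (for ports applied to casts of naturals)
def pvA (l r : Nat) : Nat :=
  if (pvBinNat l).length ≠ (pvBinNat r).length then
    parseN (List.replicate (max (pvBinNat l).length (pvBinNat r).length) '1')
  else
    parseN ((pvBinNat l).take (pvPrefLen (pvBinNat l) (pvBinNat r)) ++
      List.replicate ((pvBinNat l).length - pvPrefLen (pvBinNat l) (pvBinNat r)) '1')

lemma parseN_acc (s : List Char) : ∀ a : Nat,
    s.foldl (fun a c => 2 * a + pvBit c) a = a * 2 ^ s.length + parseN s := by
  induction s with
  | nil => intro a; simp [parseN]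
  | cons c s ih =>
    intro a
    simp only [List.foldl, List.length_cons]
    rw [ih (2 * a + pvBit c)]
    have h0 : parseN (c :: s) = (2 * 0 + pvBit c) * 2 ^ s.length + parseN s := by
      rw [show parseN (c :: s) = List.foldl (fun a c => 2 * a + pvBit c) (2 * 0 + pvBit c) s
        from rfl, ih (2 * 0 + pvBit c)]
    rw [h0]; ring

lemma parseI_acc (s : List Char) : ∀ a : Nat,
    s.foldl (fun (a : Int) c => 2 * a + (if c = '1' then 1 else 0)) (a : Int)
      = ((s.foldl (fun a c => 2 * a + pvBit c) a : Nat) : Int) := by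
  induction s with
  | nil => intro a; simp
  | cons c s ih =>
    intro a
    simp only [List.foldl]
    have : (2 * (a : Int) + (if c = '1' then 1 else 0)) = ((2 * a + pvBit c : Nat) : Int) := by
      by_cases h : c = '1' <;> simp [pvBit, h]
    rw [this, ih]

lemma parseI_eq (s : List Char) : pvParseBin s = ((parseN s : Nat) : Int) := by
  have := parseI_acc s 0
  simpa [pvParseBin, parseN] using this

lemma parseN_cons (c : Char) (s : List Char) :
    parseN (c :: s) = pvBit c * 2 ^ s.length + parseN s := by
  rw [show parseN (c :: s) = List.foldl (fun a c => 2 * a + pvBit c) (2 * 0 + pvBit c) s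
    from rfl, parseN_acc s]; ring

lemma pvBit_le (c : Char) : pvBit c ≤ 1 := by unfold pvBit; split <;> omega

lemma parseN_lt (s : List Char) (h : pvValid s) : parseN s < 2 ^ s.length := by
  induction s with
  | nil => simp [parseN]
  | cons c s ih =>
    have hs : pvValid s := fun d hd => h d (List.mem_cons_of_mem _ hd)
    have h1 := ih hs
    have h2 := pvBit_le c
    have h3 : (0:Nat) < 2 ^ s.length := Nat.two_pow_pos _
    rw [parseN_cons]
    simp only [List.length_cons, pow_succ]
    nlinarith

lemma parseN_replicate (k : Nat) : parseN (List.replicate k '1') = 2 ^ k - 1 := by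
  induction k with
  | zero => simp [parseN]
  | succ k ih =>
    rw [List.replicate_succ, parseN_cons, ih]
    have h1 : (1:Nat) ≤ 2 ^ k := Nat.one_le_two_pow
    have h2 : pvBit '1' = 1 := rfl
    simp only [List.length_replicate, h2, pow_succ]
    omega

lemma bitLenAux_congr : ∀ f1 n, n ≤ f1 → ∀ f2, n ≤ f2 → pvBitLenAux f1 n = pvBitLenAux f2 n := by
  intro f1
  induction f1 with
  | zero =>
    intro n hn f2 _
    have : n = 0 := by omega
    subst this
    cases f2 <;> rfl
  | succ f ih =>
    intro n hn f2 h2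
    cases n with
    | zero => cases f2 <;> rfl
    | succ m =>
      cases f2 with
      | zero => omega
      | succ f2' =>
        simp only [pvBitLenAux]
        rw [ih ((m + 1) / 2) (by omega) f2' (by omega)]

lemma bitLen_unfold (n : Nat) : pvBitLen n = if n = 0 then 0 else pvBitLen (n / 2) + 1 := by
  cases n with
  | zero => rfl
  | succ m =>
    rw [if_neg (Nat.succ_ne_zero m)]
    show pvBitLenAux m ((m + 1) / 2) + 1 = pvBitLenAux ((m + 1) / 2) ((m + 1) / 2) + 1
    rw [bitLenAux_congr m ((m + 1) / 2) (by omega) ((m + 1) / 2) (by omega)]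

lemma go_valid (n : Nat) : pvValid (pvNatBinGo n) := by
  induction n using Nat.strong_induction_on with
  | _ n ih =>
    rw [pvNatBinGo]
    split
    · intro c hc; simp at hc
    · rename_i h
      intro c hc
      rcases List.mem_append.1 hc with h1 | h1
      · exact ih (n / 2) (Nat.div_lt_self (Nat.pos_of_ne_zero h) one_lt_two) c h1
      · simp only [List.mem_singleton] at h1
        subst h1; split <;> simp

lemma go_len (n : Nat) : (pvNatBinGo n).length = pvBitLen n := by
  induction n using Nat.strong_induction_on with
  | _ n ih =>
    rw [pvNatBinGo, bitLen_unfold]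
    split
    · simp
    · rename_i h
      simp [List.length_append, ih (n / 2) (Nat.div_lt_self (Nat.pos_of_ne_zero h) one_lt_two)]

lemma parseN_append (s t : List Char) :
    parseN (s ++ t) = parseN s * 2 ^ t.length + parseN t := by
  rw [show parseN (s ++ t) = List.foldl (fun a c => 2 * a + pvBit c) (parseN s) t
    from by simp [parseN, List.foldl_append], parseN_acc t (parseN s)]

lemma go_parse (n : Nat) : parseN (pvNatBinGo n) = n := by
  induction n using Nat.strong_induction_on with
  | _ n ih =>
    rw [pvNatBinGo]
    split
    · rename_i h; simp [parseN, h]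
    · rename_i h
      rw [parseN_append, ih (n / 2) (Nat.div_lt_self (Nat.pos_of_ne_zero h) one_lt_two)]
      have hm : n % 2 < 2 := Nat.mod_lt _ (by norm_num)
      have hd := Nat.div_add_mod n 2
      by_cases h2 : n % 2 = 1
      · simp [h2, parseN, pvBit]; omega
      · have h0 : n % 2 = 0 := by omega
        simp [h2, parseN, pvBit]
        omega

lemma binNat_valid (n : Nat) : pvValid (pvBinNat n) := by
  unfold pvBinNat; split
  · intro c hc; simp at hc; simp [hc]
  · exact go_valid n

lemma binNat_parse (n : Nat) : parseN (pvBinNat n) = n := by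
  unfold pvBinNat; split
  · rename_i h; subst h; simp [parseN, pvBit]
  · exact go_parse n

lemma bitLen_zero : pvBitLen 0 = 0 := rfl

lemma binNat_len (n : Nat) : (pvBinNat n).length = if n = 0 then 1 else pvBitLen n := by
  unfold pvBinNat; split <;> simp_all [go_len]

lemma lt_two_pow_bitLen (n : Nat) : n < 2 ^ pvBitLen n := by
  induction n using Nat.strong_induction_on with
  | _ n ih =>
    rw [bitLen_unfold]
    split
    · omega
    · rename_i h
      have h1 := ih (n / 2) (Nat.div_lt_self (Nat.pos_of_ne_zero h) one_lt_two)
      have hd := Nat.div_add_mod n 2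
      have hm : n % 2 < 2 := Nat.mod_lt _ (by norm_num)
      rw [pow_succ]
      omega

lemma bitLen_le_of_lt : ∀ n k : Nat, n < 2 ^ k → pvBitLen n ≤ k := by
  intro n
  induction n using Nat.strong_induction_on with
  | _ n ih =>
    intro k hk
    rw [bitLen_unfold]
    split
    · omega
    · rename_i h
      cases k with
      | zero => simp at hk; omega
      | succ k =>
        have hdiv : n / 2 < 2 ^ k := by
          have hd := Nat.div_add_mod n 2
          have hm : n % 2 < 2 := Nat.mod_lt _ (by norm_num)
          rw [pow_succ] at hk
          omega
        have := ih (n / 2) (Nat.div_lt_self (Nat.pos_of_ne_zero h) one_lt_two) k hdiv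
        omega

lemma lt_bitLen_of_le {n k : Nat} (h : 2 ^ k ≤ n) : k < pvBitLen n := by
  by_contra h'
  have h2 : pvBitLen n ≤ k := by omega
  have := lt_of_lt_of_le (lt_two_pow_bitLen n) (Nat.pow_le_pow_right (by norm_num) h2)
  omega

lemma bitLen_pos {n : Nat} (h : n ≠ 0) : 1 ≤ pvBitLen n := by
  rw [bitLen_unfold]; split
  · exact absurd ‹n = 0› h
  · omega

lemma two_pow_pred_le {n : Nat} (h : n ≠ 0) : 2 ^ (pvBitLen n - 1) ≤ n := by
  by_contra h'
  have h1 := bitLen_le_of_lt n (pvBitLen n - 1) (by omega)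
  have h2 := bitLen_pos h
  omega

lemma bitLen_two_pow_add {k e : Nat} (he : e < 2 ^ k) : pvBitLen (2 ^ k + e) = k + 1 := by
  have h1 : pvBitLen (2 ^ k + e) ≤ k + 1 := by
    apply bitLen_le_of_lt
    rw [pow_succ]; omega
  have h2 : k < pvBitLen (2 ^ k + e) := lt_bitLen_of_le (by omega)
  omega

lemma or_absorb {a n : Nat} (h : a < 2 ^ n) : a ||| (2 ^ n - 1) = 2 ^ n - 1 := by
  apply Nat.eq_of_testBit_eq
  intro i
  rw [Nat.testBit_or, Nat.testBit_two_pow_sub_one]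
  by_cases hi : i < n
  · simp [hi]
  · have hai : a < 2 ^ i := lt_of_lt_of_le h (Nat.pow_le_pow_right (by norm_num) (by omega))
    simp [hi, Nat.testBit_lt_two_pow hai]

lemma or_high {v a m k : Nat} (ha : a < 2 ^ k) (hm : m < 2 ^ k) :
    (2 ^ k * v + a) ||| m = 2 ^ k * v + (a ||| m) := by
  have hor : a ||| m < 2 ^ k := Nat.or_lt_two_pow ha hm
  apply Nat.eq_of_testBit_eq
  intro i
  rw [Nat.testBit_or, Nat.testBit_two_pow_mul_add v ha i, Nat.testBit_two_pow_mul_add v hor i]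
  by_cases hi : i < k
  · simp [hi, Nat.testBit_or]
  · have hmi : m < 2 ^ i := lt_of_lt_of_le hm (Nat.pow_le_pow_right (by norm_num) (by omega))
    simp [hi, Nat.testBit_lt_two_pow hmi]

lemma xor_high {v w a b k : Nat} (ha : a < 2 ^ k) (hb : b < 2 ^ k) :
    (2 ^ k * v + a) ^^^ (2 ^ k * w + b) = 2 ^ k * (v ^^^ w) + (a ^^^ b) := by
  have hx : a ^^^ b < 2 ^ k := Nat.xor_lt_two_pow ha hb
  apply Nat.eq_of_testBit_eq
  intro i
  rw [Nat.testBit_xor, Nat.testBit_two_pow_mul_add v ha i, Nat.testBit_two_pow_mul_add w hb i,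
    Nat.testBit_two_pow_mul_add (v ^^^ w) hx i]
  by_cases hi : i < k
  · simp [hi, Nat.testBit_xor]
  · simp [hi, Nat.testBit_xor]

lemma prefLen_cons (x y : Char) (xs ys : List Char) :
    pvPrefLen (x :: xs) (y :: ys) = if x = y then pvPrefLen xs ys + 1 else 0 := rfl

lemma prefLen_le : ∀ xs ys : List Char, pvPrefLen xs ys ≤ xs.length := by
  intro xs
  induction xs with
  | nil => intro ys; cases ys <;> simp [pvPrefLen]
  | cons x xs ih =>
    intro ys
    cases ys with
    | nil => simp [pvPrefLen]
    | cons y ys =>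
      simp only [pvPrefLen, List.length_cons]
      split
      · have := ih ys; omega
      · omega

lemma prefLen_self : ∀ xs : List Char, pvPrefLen xs xs = xs.length := by
  intro xs
  induction xs with
  | nil => simp [pvPrefLen]
  | cons x xs ih => simp [pvPrefLen, ih]

lemma L_main : ∀ xs ys : List Char, pvValid xs → pvValid ys → xs.length = ys.length →
    parseN (xs.take (pvPrefLen xs ys) ++ List.replicate (xs.length - pvPrefLen xs ys) '1')
      = parseN ys ||| (2 ^ (xs.length - pvPrefLen xs ys) - 1) := by
  intro xs
  induction xs with
  | nil =>
    intro ys _ _ hlen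
    have : ys = [] := List.eq_nil_of_length_eq_zero (by simpa using hlen.symm)
    subst this
    simp [pvPrefLen, parseN]
  | cons x xs ih =>
    intro ys hvx hvy hlen
    cases ys with
    | nil => simp at hlen
    | cons y ys =>
      have hlen' : xs.length = ys.length := by simpa using hlen
      have hvx' : pvValid xs := fun d hd => hvx d (List.mem_cons_of_mem _ hd)
      have hvy' : pvValid ys := fun d hd => hvy d (List.mem_cons_of_mem _ hd)
      by_cases hxy : x = y
      · subst hxy
        rw [prefLen_cons, if_pos rfl]
        simp only [List.length_cons]
        have hcle : pvPrefLen xs ys ≤ xs.length := prefLen_le xs ys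
        have htake : (x :: xs).take (pvPrefLen xs ys + 1) = x :: xs.take (pvPrefLen xs ys) := by
          simp [List.take_succ_cons]
        have hsub : xs.length + 1 - (pvPrefLen xs ys + 1) = xs.length - pvPrefLen xs ys := by
          omega
        rw [htake, hsub]
        have hinner :
            (xs.take (pvPrefLen xs ys) ++
              List.replicate (xs.length - pvPrefLen xs ys) '1').length = xs.length := by
          simp [List.length_take, List.length_replicate]
          omega
        rw [List.cons_append, parseN_cons, hinner, ih ys hvx' hvy' hlen', parseN_cons, ← hlen']
        have hm : 2 ^ (xs.length - pvPrefLen xs ys) - 1 < 2 ^ xs.length := by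
          have h1 : (1:Nat) ≤ 2 ^ (xs.length - pvPrefLen xs ys) := Nat.one_le_two_pow
          have h2 : 2 ^ (xs.length - pvPrefLen xs ys) ≤ 2 ^ xs.length :=
            Nat.pow_le_pow_right (by norm_num) (by omega)
          omega
        have ha : parseN ys < 2 ^ xs.length := hlen' ▸ parseN_lt ys hvy'
        rw [mul_comm (pvBit x), or_high ha hm]
      · rw [prefLen_cons, if_neg hxy]
        simp only [List.length_cons, Nat.sub_zero, List.take_zero, List.nil_append]
        rw [parseN_replicate]
        have ha : parseN (y :: ys) < 2 ^ (xs.length + 1) := by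
          have := parseN_lt (y :: ys) hvy
          simpa [hlen'] using this
        rw [or_absorb ha]

lemma L_d : ∀ xs ys : List Char, pvValid xs → pvValid ys → xs.length = ys.length → xs ≠ ys →
    pvBitLen (parseN xs ^^^ parseN ys) = xs.length - pvPrefLen xs ys := by
  intro xs
  induction xs with
  | nil =>
    intro ys _ _ hlen hne
    have : ys = [] := List.eq_nil_of_length_eq_zero (by simpa using hlen.symm)
    exact absurd this.symm (by simpa using hne)
  | cons x xs ih =>
    intro ys hvx hvy hlen hne
    cases ys with
    | nil => simp at hlen
    | cons y ys =>
      have hlen' : xs.length = ys.length := by simpa using hlen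
      have hvx' : pvValid xs := fun d hd => hvx d (List.mem_cons_of_mem _ hd)
      have hvy' : pvValid ys := fun d hd => hvy d (List.mem_cons_of_mem _ hd)
      have ha : parseN xs < 2 ^ xs.length := parseN_lt xs hvx'
      have hb : parseN ys < 2 ^ xs.length := by rw [hlen']; exact parseN_lt ys hvy'
      by_cases hxy : x = y
      · subst hxy
        have hne' : xs ≠ ys := by intro h; exact hne (by rw [h])
        rw [parseN_cons, parseN_cons, hlen'.symm]
        rw [mul_comm (pvBit x), xor_high ha hb]
        simp only [Nat.xor_self, Nat.mul_zero, Nat.zero_add]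
        rw [ih ys hvx' hvy' hlen' hne', prefLen_cons, if_pos rfl]
        simp only [List.length_cons]
        omega
      · have hx01 := hvx x (List.mem_cons_self ..)
        have hy01 := hvy y (List.mem_cons_self ..)
        have hbits : pvBit x ^^^ pvBit y = 1 := by
          rcases hx01 with h1 | h1 <;> rcases hy01 with h2 | h2 <;>
            simp_all [pvBit]
        rw [parseN_cons, parseN_cons, hlen'.symm, mul_comm (pvBit x), mul_comm (pvBit y),
          xor_high ha hb, hbits, Nat.mul_one]
        have hx : parseN xs ^^^ parseN ys < 2 ^ xs.length := Nat.xor_lt_two_pow ha hb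
        rw [bitLen_two_pow_add hx, prefLen_cons, if_neg hxy]
        simp

lemma lenBin (n : Nat) : (pvBinNat n).length = max 1 (pvBitLen n) := by
  rw [binNat_len]
  by_cases h : n = 0
  · rw [if_pos h, h, bitLen_zero]
    omega
  · have := bitLen_pos h
    rw [if_neg h]
    omega

lemma pyBinLen_ge (x : Int) : 2 ≤ pvPyBinLen x := by
  unfold pvPyBinLen
  split <;> omega

lemma lenSlice (x : Int) : (pvBinSlice2 x).length = pvPyBinLen x - 2 := by
  unfold pvBinSlice2 pvPyBinLen
  by_cases hneg : x < 0
  · simp only [if_pos hneg, List.length_cons, lenBin]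
    omega
  · have hx : x.toNat = x.natAbs := by omega
    simp only [if_neg hneg, lenBin, hx]
    omega

lemma natEq (l r : Nat) (hlen : (pvBinNat l).length = (pvBinNat r).length) :
    parseN ((pvBinNat l).take (pvPrefLen (pvBinNat l) (pvBinNat r)) ++
        List.replicate ((pvBinNat l).length - pvPrefLen (pvBinNat l) (pvBinNat r)) '1')
      = if l = r then l else r ||| (2 ^ pvBitLen (l ^^^ r) - 1) := by
  by_cases hlr : l = r
  · subst hlr
    rw [prefLen_self, List.take_length, Nat.sub_self, List.replicate_zero, List.append_nil,
      binNat_parse, if_pos rfl]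
  · have hne : pvBinNat l ≠ pvBinNat r := by
      intro h
      exact hlr (by rw [← binNat_parse l, h, binNat_parse r])
    have hd := L_d (pvBinNat l) (pvBinNat r) (binNat_valid l) (binNat_valid r) hlen hne
    rw [binNat_parse, binNat_parse] at hd
    rw [L_main (pvBinNat l) (pvBinNat r) (binNat_valid l) (binNat_valid r) hlen,
      binNat_parse, hd, if_neg hlr]

lemma slice_cast (l : Nat) : pvBinSlice2 (l : Int) = pvBinNat l := by
  simp [pvBinSlice2]

lemma A_cast (l r : Nat) : max_bitwise_or (l : Int) (r : Int) = ((pvA l r : Nat) : Int) := by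
  simp only [max_bitwise_or, slice_cast, pvA]
  split_ifs with h
  · exact parseI_eq _
  · exact parseI_eq _

lemma B_cast (l r : Nat) (hww : pvPyBinLen (l : Int) - 2 = pvPyBinLen (r : Int) - 2) :
    max_bitwise_or_alt (l : Int) (r : Int)
      = ((if l = r then l else r ||| (2 ^ pvBitLen (l ^^^ r) - 1) : Nat) : Int) := by
  simp only [max_bitwise_or_alt]
  rw [if_neg (not_ne_iff.mpr hww)]
  by_cases hlr : l = r
  · subst hlr; simp
  · have hne : (l : Int) ≠ (r : Int) := by exact_mod_cast hlr
    rw [if_neg hne, if_neg hlr]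
    have hxor : Int.xor (l : Int) (r : Int) = ((l ^^^ r : Nat) : Int) := rfl
    rw [hxor]
    simp only [Int.natAbs_natCast]
    have h2 : ((2 ^ pvBitLen (l ^^^ r) : Nat) : Int) - 1
        = ((2 ^ pvBitLen (l ^^^ r) - 1 : Nat) : Int) := by
      rw [Int.natCast_sub Nat.one_le_two_pow, Nat.cast_one]
    rw [Nat.one_shiftLeft, h2]
    rfl

lemma widthDiff (L R : Int) (hw : pvPyBinLen L ≠ pvPyBinLen R) :
    max_bitwise_or L R = max_bitwise_or_alt L R := by
  have h2L := pyBinLen_ge L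
  have h2R := pyBinLen_ge R
  have hww : pvPyBinLen L - 2 ≠ pvPyBinLen R - 2 := by omega
  have hlen : (pvBinSlice2 L).length ≠ (pvBinSlice2 R).length := by
    rw [lenSlice, lenSlice]; exact hww
  simp only [max_bitwise_or, max_bitwise_or_alt]
  rw [if_pos hlen, if_pos hww, parseI_eq, parseN_replicate, lenSlice, lenSlice,
    Nat.one_shiftLeft, Int.natCast_sub Nat.one_le_two_pow, Nat.cast_one]

lemma bitLen_one : pvBitLen 1 = 1 := rfl

lemma digits_unique {n d : Nat} (hd : pvDigits n d) : d = max 1 (pvBitLen n) := by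
  obtain ⟨h1, h2, h3⟩ := hd
  rcases h3 with h3 | h3
  · subst h3
    have hn : n < 2 := by simpa using h2
    interval_cases n
    · rw [bitLen_zero]
      omega
    · rw [bitLen_one]
      omega
  · have ha := lt_bitLen_of_le h3
    have hb := bitLen_le_of_lt n d h2
    omega

lemma digits_of (n : Nat) : pvDigits n (max 1 (pvBitLen n)) := by
  by_cases h : n = 0
  · subst h
    rw [bitLen_zero]
    exact ⟨by omega, by norm_num, Or.inl rfl⟩
  · have h1 := bitLen_pos h
    have hmax : max 1 (pvBitLen n) = pvBitLen n := by omega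
    rw [hmax]
    exact ⟨h1, lt_two_pow_bitLen n, Or.inr (two_pow_pred_le h)⟩

lemma pyBinLen_eq {x : Int} {d : Nat} (hd : pvDigits x.natAbs d) :
    pvPyBinLen x = 2 + (if x < 0 then d + 1 else d) := by
  have he := digits_unique hd
  subst he
  unfold pvPyBinLen
  split_ifs <;> omega

lemma sameWidth_iff {L R : Int} (hL : L.natAbs < 2 ^ 32) (hR : R.natAbs < 2 ^ 32) :
    pvSameWidth L R ↔ pvPyBinLen L = pvPyBinLen R := by
  constructor
  · rintro ⟨d1, _, d2, _, hd1, hd2, heq⟩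
    rw [pyBinLen_eq hd1, pyBinLen_eq hd2]
    split_ifs at heq ⊢ <;> omega
  · intro hw
    refine ⟨max 1 (pvBitLen L.natAbs), ?_, max 1 (pvBitLen R.natAbs), ?_,
      digits_of _, digits_of _, ?_⟩
    · have := bitLen_le_of_lt L.natAbs 32 hL
      omega
    · have := bitLen_le_of_lt R.natAbs 32 hR
      omega
    · rw [pyBinLen_eq (digits_of L.natAbs), pyBinLen_eq (digits_of R.natAbs)] at hw
      split_ifs at hw ⊢ <;> omega

-- ===== VERDICT (by name: the statement is the Claim_ definition above) =====
theorem max_bitwise_or_spec : Claim_equal_max_bitwise_or := by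
  intro L R hDom hPre
  unfold Spec_max_bitwise_or
  have hDomL : L.natAbs < 2 ^ 32 ∧ R.natAbs < 2 ^ 32 := by
    unfold Dom_max_bitwise_or pvDomInt at hDom
    simp only [Bool.and_eq_true, decide_eq_true_eq] at hDom
    omega
  by_cases hw : pvPyBinLen L = pvPyBinLen R
  · unfold Pre_max_bitwise_or at hPre
    have hsw : pvSameWidth L R := (sameWidth_iff hDomL.1 hDomL.2).mpr hw
    have hL : 0 ≤ L := by
      by_contra h
      exact hPre ⟨Or.inl (by omega), hsw⟩
    have hR : 0 ≤ R := by
      by_contra h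
      exact hPre ⟨Or.inr (by omega), hsw⟩
    obtain ⟨l, rfl⟩ := Int.eq_ofNat_of_zero_le hL
    obtain ⟨r, rfl⟩ := Int.eq_ofNat_of_zero_le hR
    have hlen : (pvBinNat l).length = (pvBinNat r).length := by
      have h1 := lenSlice (l : Int)
      have h2 := lenSlice (r : Int)
      rw [slice_cast] at h1 h2
      have h3 := pyBinLen_ge (l : Int)
      have h4 := pyBinLen_ge (r : Int)
      omega
    rw [A_cast, B_cast l r (by omega)]
    congr 1
    unfold pvA
    rw [if_neg (by simpa using hlen)]
    exact natEq l r hlen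
  · exact widthDiff L R hw
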